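-- pv_equiv track=rewrite | github.com/FrederikHennecke/Multi-Agent-Vector | src/evaluation/cache_results.py | _last_refiner_and_prev_verifier
-- ===== SOURCE A (Python) =====
-- def _last_refiner_and_prev_verifier(conv: list[tuple[str, str]]) -> tuple[str, str]:
--     refiner = ""
--     prev_verifier = ""
--     for idx in range(len(conv) - 1, -1, -1):
--         role, msg = conv[idx]
--         if role == "REFINER" and isinstance(msg, str) and msg.strip():
--             refiner = msg
--             for j in range(idx - 1, -1, -1):
--                 role2, msg2 = conv[j]
--                 if role2 == "VERIFIER" and isinstance(msg2, str) and msg2.strip():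
--                     prev_verifier = msg2
--                     break
--             break
--     return refiner, prev_verifier
-- ===== SOURCE B (Python) =====
-- def _last_refiner_and_prev_verifier(conv: list[tuple[str, str]]) -> tuple[str, str]:
--     refiner = ""
--     prev_verifier = ""
--     last_verifier = ""
--     for role, msg in conv:
--         if isinstance(msg, str) and msg.strip():
--             if role == "VERIFIER":
--                 last_verifier = msg
--             elif role == "REFINER":
--                 refiner = msg
--                 prev_verifier = last_verifier
--     return refiner, prev_verifier
-- ===== Notes on version B (the rewrite author's own statement) =====
-- stated objective: simpler
-- what changed: Replaces the backward scan for the last REFINER plus a nested backward scan for the preceding VERIFIER with a single forward pass that maintains the most recent non-empty VERIFIER message and snapshots it at each non-empty REFINER message.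
import Mathlib
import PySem

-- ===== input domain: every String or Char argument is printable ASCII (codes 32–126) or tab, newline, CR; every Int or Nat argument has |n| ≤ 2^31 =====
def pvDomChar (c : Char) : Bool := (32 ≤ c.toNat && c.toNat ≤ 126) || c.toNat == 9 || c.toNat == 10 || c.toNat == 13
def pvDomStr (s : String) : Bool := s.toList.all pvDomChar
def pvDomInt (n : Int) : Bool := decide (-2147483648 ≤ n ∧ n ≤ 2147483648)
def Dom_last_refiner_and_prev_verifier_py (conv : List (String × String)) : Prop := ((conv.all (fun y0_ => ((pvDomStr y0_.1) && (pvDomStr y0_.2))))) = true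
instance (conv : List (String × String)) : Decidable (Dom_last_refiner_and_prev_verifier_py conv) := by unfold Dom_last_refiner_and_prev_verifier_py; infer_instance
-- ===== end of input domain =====

-- B replaces A's backward scan with nested backward scan by one forward pass
-- maintaining the latest non-empty VERIFIER message (objective: simpler, one pass).

-- ===== PORT A =====
-- 'msg.strip()' truthiness = strip result non-empty; ported via PySem.Chars.strip.
-- inner loop of A: scan indices j-1, j-2, …, 0 for first non-empty VERIFIER message
def pvInnerA (conv : List (String × String)) : Nat → String
  | 0 => ""
  | Nat.succ j =>
    let p := conv.getD j ("", "")
    if p.1 == "VERIFIER" && !(PySem.Chars.strip p.2.toList).isEmpty then p.2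
    else pvInnerA conv j

-- outer loop of A: scan indices i-1, …, 0 for the last non-empty REFINER message
def pvOuterA (conv : List (String × String)) : Nat → String × String
  | 0 => ("", "")
  | Nat.succ i =>
    let p := conv.getD i ("", "")
    if p.1 == "REFINER" && !(PySem.Chars.strip p.2.toList).isEmpty then
      (p.2, pvInnerA conv i)
    else pvOuterA conv i

def last_refiner_and_prev_verifier_py (conv : List (String × String)) : String × String :=
  pvOuterA conv conv.length

-- ===== PORT B =====
-- forward fold over the conversation; state = (refiner, prev_verifier, last_verifier)
def pvStepB (st : String × String × String) (p : String × String) : String × String × String :=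
  if !(PySem.Chars.strip p.2.toList).isEmpty then
    if p.1 == "VERIFIER" then (st.1, st.2.1, p.2)
    else if p.1 == "REFINER" then (p.2, st.2.2, st.2.2)
    else st
  else st

def last_refiner_and_prev_verifier_py_alt (conv : List (String × String)) : String × String :=
  let st := conv.foldl pvStepB ("", "", "")
  (st.1, st.2.1)

-- ===== PRECONDITION & SPEC =====
def Spec_last_refiner_and_prev_verifier_py (conv : List (String × String)) (out : String × String) : Prop := out = last_refiner_and_prev_verifier_py_alt conv
instance (conv : List (String × String)) (out : String × String) : Decidable (Spec_last_refiner_and_prev_verifier_py conv out) := by unfold Spec_last_refiner_and_prev_verifier_py; infer_instance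

-- ===== CLAIM (what is proved, stated in full; the proofs are below) =====
def Claim_equal_last_refiner_and_prev_verifier_py : Prop := ∀ (conv : List (String × String)), Dom_last_refiner_and_prev_verifier_py conv → Spec_last_refiner_and_prev_verifier_py conv (last_refiner_and_prev_verifier_py conv)

-- ===== LEMMAS AND PROOFS =====

theorem pvInnerA_append (xs : List (String × String)) (x : String × String)
    (j : Nat) (hj : j ≤ xs.length) : pvInnerA (xs ++ [x]) j = pvInnerA xs j := by
  induction j with
  | zero => rfl
  | succ j ih =>
    have hlt : j < xs.length := by omega
    simp only [pvInnerA, List.getD_append _ _ _ _ hlt, ih (by omega)]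

theorem pvOuterA_append (xs : List (String × String)) (x : String × String)
    (i : Nat) (hi : i ≤ xs.length) : pvOuterA (xs ++ [x]) i = pvOuterA xs i := by
  induction i with
  | zero => rfl
  | succ i ih =>
    have hlt : i < xs.length := by omega
    simp only [pvOuterA, List.getD_append _ _ _ _ hlt, ih (by omega),
      pvInnerA_append xs x i (by omega)]

-- the forward fold's state is exactly (A's outer-loop answer, A's full backward verifier scan)
theorem pvState_eq (xs : List (String × String)) :
    xs.foldl pvStepB ("", "", "") =
      ((pvOuterA xs xs.length).1, (pvOuterA xs xs.length).2, pvInnerA xs xs.length) := by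
  induction xs using List.reverseRecOn with
  | nil => rfl
  | append_singleton xs x ih =>
    have hlen : (xs ++ [x]).length = xs.length + 1 := by simp
    have hget : (xs ++ [x]).getD xs.length ("", "") = x := by
      simp [List.getD]
    rw [List.foldl_append, ih, hlen]
    simp only [pvOuterA, pvInnerA, hget,
      pvOuterA_append xs x xs.length (le_refl _), pvInnerA_append xs x xs.length (le_refl _)]
    by_cases hs : (PySem.Chars.strip x.2.toList).isEmpty = true
    · simp [pvStepB, hs]
    · by_cases hv : x.1 == "VERIFIER"
      · have hr : (x.1 == "REFINER") = false := by
          rw [eq_of_beq hv]; decide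
        simp [pvStepB, hs, hv, hr]
      · by_cases hr : x.1 == "REFINER"
        · simp [pvStepB, hs, hv, hr]
        · simp [pvStepB, hs, hv, hr]

-- ===== VERDICT (by name: the statement is the Claim_ definition above) =====
theorem last_refiner_and_prev_verifier_py_spec : Claim_equal_last_refiner_and_prev_verifier_py := by
  intro conv _
  show _ = _
  simp [last_refiner_and_prev_verifier_py, last_refiner_and_prev_verifier_py_alt, pvState_eq]
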